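-- pv_equiv track=rewrite | github.com/chointer/CodingProblems | 프로그래머스/2/389479. 서버 증설 횟수/서버 증설 횟수.py | solution
-- ===== SOURCE A (Python) =====
-- def solution(players, m, k):
--     count = 0
--     hours = len(players)
--     servers_n = [0 for _ in range(hours)]
--
--     for i, p in enumerate(players):
--         servers_req = p // m
--
--         servers_add = servers_req - servers_n[i]
--         if servers_add > 0:
--             count += servers_add
--             for j in range(i, min(i + k, hours)):
--                 servers_n[j] += servers_add
--
--     return count
-- ===== SOURCE B (Python) =====
-- def solution(players, m, k):
--     n = len(players)
--     expire = [0] * n          # expire[t] = number of rented servers whose lease ends at hour t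
--     active = 0
--     count = 0
--     for i, p in enumerate(players):
--         active -= expire[i]
--         need = p // m
--         add = need - active
--         if add > 0:
--             count += add
--             if k > 0:
--                 active += add
--                 if i + k < n:
--                     expire[i + k] += add
--     return count
-- ===== Notes on version B (the rewrite author's own statement) =====
-- stated objective: faster
-- what changed: Replaced A's per-hour inner write loop over the next k slots of a servers array by a single pass that keeps a running count of active servers plus a difference array of lease expirations, so each hour does O(1) work instead of O(k).
import Mathlib
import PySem

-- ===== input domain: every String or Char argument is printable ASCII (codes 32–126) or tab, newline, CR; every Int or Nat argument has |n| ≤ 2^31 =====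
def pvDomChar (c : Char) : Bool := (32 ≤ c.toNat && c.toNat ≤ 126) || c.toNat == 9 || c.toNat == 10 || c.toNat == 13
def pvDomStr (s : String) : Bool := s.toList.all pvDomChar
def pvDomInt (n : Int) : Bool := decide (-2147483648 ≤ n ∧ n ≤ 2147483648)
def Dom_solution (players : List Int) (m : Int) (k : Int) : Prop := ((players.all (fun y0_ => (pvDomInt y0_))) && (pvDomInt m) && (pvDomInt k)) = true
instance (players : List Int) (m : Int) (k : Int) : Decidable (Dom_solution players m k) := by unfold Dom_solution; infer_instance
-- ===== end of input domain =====

-- B replaces A's O(n*k) inner write loop by an O(n) running active-server counter with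
-- an expiration difference array (return value only; neither mutates its arguments).

-- ===== PORT A =====
-- loop body of A's `for i, p in enumerate(players)`; the inner foldl is
-- `for j in range(i, min(i + k, hours)): servers_n[j] += servers_add`
-- (j.toNat is exact: every j produced by the range satisfies 0 ≤ i ≤ j;
--  servers.getD i.toNat 0 is exact for servers_n[i]: 0 ≤ i < hours = length)
def solutionStepA (m k hours : Int) (st : Int × List Int) (ip : Int × Int) : Int × List Int :=
  let count := st.1
  let servers := st.2
  let i := ip.1
  let p := ip.2
  let servers_req := PySem.Int.floordiv p m
  let servers_add := servers_req - servers.getD i.toNat 0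
  if 0 < servers_add then
    (count + servers_add,
     (PySem.List.pyRange i (min (i + k) hours) 1).foldl
       (fun s j => s.set j.toNat (s.getD j.toNat 0 + servers_add)) servers)
  else (count, servers)

def solution (players : List Int) (m : Int) (k : Int) : Int :=
  let hours : Int := players.length
  let servers0 : List Int := (PySem.List.pyRange 0 hours 1).map (fun _ => (0 : Int))
  ((PySem.List.enumerate players 0).foldl (solutionStepA m k hours) (0, servers0)).1

-- ===== PORT B =====
-- loop body of B's `for i, p in enumerate(players)`; state = (count, active, expire)
-- (indices i and i + k are nonnegative where used, so .toNat is exact)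
def solutionStepB (m k n : Int) (st : Int × Int × List Int) (ip : Int × Int) : Int × Int × List Int :=
  let count := st.1
  let active := st.2.1 - st.2.2.getD ip.1.toNat 0
  let expire := st.2.2
  let i := ip.1
  let p := ip.2
  let need := PySem.Int.floordiv p m
  let add := need - active
  if 0 < add then
    if 0 < k then
      (count + add, active + add,
       if i + k < n then expire.set (i + k).toNat (expire.getD (i + k).toNat 0 + add) else expire)
    else (count + add, active, expire)
  else (count, active, expire)

def solution_alt (players : List Int) (m : Int) (k : Int) : Int :=
  let n : Int := players.length
  let expire0 : List Int := List.replicate players.length (0 : Int)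
  ((PySem.List.enumerate players 0).foldl (solutionStepB m k n) (0, 0, expire0)).1

-- ===== PRECONDITION & SPEC =====
-- Pre_ excludes only the inputs where Python's `p // m` raises ZeroDivisionError:
-- m = 0 with a nonempty players list (with players = [] the division never runs).
def Pre_solution (players : List Int) (m : Int) (k : Int) : Prop := players = [] ∨ m ≠ 0
instance (players : List Int) (m : Int) (k : Int) : Decidable (Pre_solution players m k) := by unfold Pre_solution; infer_instance
def pvWitness_solution : List Int × Int × Int := ([3, 1, 4, 1], 2, 2)

def Spec_solution (players : List Int) (m : Int) (k : Int) (out : Int) : Prop := out = solution_alt players m k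
instance (players : List Int) (m : Int) (k : Int) (out : Int) : Decidable (Spec_solution players m k out) := by unfold Spec_solution; infer_instance

-- ===== CLAIM (what is proved, stated in full; the proofs are below) =====
def Claim_equal_solution : Prop := ∀ (players : List Int) (m : Int) (k : Int), Dom_solution players m k → Pre_solution players m k → Spec_solution players m k (solution players m k)

-- ===== LEMMAS AND PROOFS =====

-- sum of expire over the index window [a, b)
def pvS (e : List Int) (a b : Nat) : Int := ∑ j ∈ Finset.Ico a b, e.getD j 0

theorem pvS_bot (e : List Int) (a b : Nat) (h : a < b) :
    pvS e a b = e.getD a 0 + pvS e (a + 1) b := by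
  unfold pvS
  exact Finset.sum_eq_sum_Ico_succ_bot h _

theorem pvS_single (e : List Int) (a : Nat) : pvS e a (a + 1) = e.getD a 0 := by
  unfold pvS
  simp

theorem pv_getD_set (e : List Int) (u : Nat) (v : Int) (hu : u < e.length) (t : Nat) :
    (e.set u v).getD t 0 = if t = u then v else e.getD t 0 := by
  simp only [List.getD, List.getElem?_set]
  rcases eq_or_ne u t with h | h
  · subst h; simp [hu]
  · simp [h, Ne.symm h]

theorem pvS_set (e : List Int) (u : Nat) (add : Int) (hu : u < e.length) (a b : Nat) :
    pvS (e.set u (e.getD u 0 + add)) a b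
      = pvS e a b + (if a ≤ u ∧ u < b then add else 0) := by
  unfold pvS
  have : ∀ j ∈ Finset.Ico a b,
      (e.set u (e.getD u 0 + add)).getD j 0
        = e.getD j 0 + (if j = u then add else 0) := by
    intro j _
    rw [pv_getD_set e u _ hu j]
    split_ifs with h
    · subst h; ring
    · ring
  rw [Finset.sum_congr rfl this, Finset.sum_add_distrib]
  congr 1
  rw [Finset.sum_ite_eq' (Finset.Ico a b) u (fun _ => add)]
  simp [Finset.mem_Ico]

theorem pvBump_length (add : Int) :
    ∀ (L : List Int) (s : List Int),
      (L.foldl (fun s j => s.set j.toNat (s.getD j.toNat 0 + add)) s).length = s.length := by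
  intro L
  induction L with
  | nil => intro s; rfl
  | cons x L ih => intro s; rw [List.foldl_cons, ih]; exact List.length_set ..

theorem pvBump_getD (add : Int) :
    ∀ (fuel : Nat) (i stop : Int), (stop - i).toNat = fuel → 0 ≤ i →
      ∀ (s : List Int), stop ≤ (s.length : Int) → ∀ (t : Nat),
      ((PySem.List.pyRange i stop 1).foldl
          (fun s j => s.set j.toNat (s.getD j.toNat 0 + add)) s).getD t 0
        = s.getD t 0 + (if i ≤ (t : Int) ∧ (t : Int) < stop then add else 0) := by
  intro fuel
  induction fuel with
  | zero =>
    intro i stop hf hi s hlen t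
    rw [PySem.List.pyRange_one_eq_nil (by omega)]
    simp only [List.foldl_nil]
    rw [if_neg (by omega)]
    ring
  | succ f ih =>
    intro i stop hf hi s hlen t
    rw [PySem.List.pyRange_one_cons (by omega)]
    rw [List.foldl_cons]
    have hilen : i.toNat < s.length := by omega
    rw [ih (i + 1) stop (by omega) (by omega) _
        (by rw [List.length_set]; omega) t]
    rw [pv_getD_set s i.toNat _ hilen t]
    by_cases ht : t = i.toNat
    · subst ht
      rw [if_pos rfl, if_neg (by omega : ¬(i + 1 ≤ (i.toNat : Int) ∧ (i.toNat : Int) < stop)),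
        if_pos (by omega : i ≤ (i.toNat : Int) ∧ (i.toNat : Int) < stop)]
      ring
    · rw [if_neg ht]
      congr 1
      by_cases h1 : i ≤ (t : Int) ∧ (t : Int) < stop
      · rw [if_pos h1, if_pos ⟨by omega, h1.2⟩]
      · rw [if_neg h1, if_neg (by omega)]

theorem pv_loop_eq (m k : Int) (n : Nat) :
    ∀ (rest : List Int) (i : Nat) (c active : Int) (servers expire : List Int),
      i + rest.length = n →
      servers.length = n → expire.length = n →
      (∀ t : Nat, i ≤ t → t < n → servers.getD t 0 = active - pvS expire i (t + 1)) →
      ((PySem.List.enumerate rest (i : Int)).foldl (solutionStepA m k (n : Int)) (c, servers)).1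
        = ((PySem.List.enumerate rest (i : Int)).foldl (solutionStepB m k (n : Int)) (c, active, expire)).1 := by
  intro rest
  induction rest with
  | nil => intro i c active servers expire _ _ _ _; rfl
  | cons p rest ih =>
    intro i c active servers expire hn hs he hinv
    have hi_n : i < n := by simp at hn; omega
    have hinv_i : servers.getD i 0 = active - expire.getD i 0 := by
      have := hinv i le_rfl hi_n
      rwa [pvS_single] at this
    rw [PySem.List.enumerate_cons]
    simp only [List.foldl_cons]
    simp only [solutionStepA, solutionStepB, Int.toNat_natCast]
    rw [hinv_i]
    have hcast : ((i : Int) + 1) = (((i + 1 : Nat)) : Int) := by push_cast; ring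
    by_cases hadd : 0 < PySem.Int.floordiv p m - (active - expire.getD i 0)
    · rw [if_pos hadd, if_pos hadd]
      by_cases hk : 0 < k
      · rw [if_pos hk]
        rw [hcast]
        have hstop : min ((i : Int) + k) (n : Int) ≤ (servers.length : Int) := by
          rw [hs]; omega
        apply ih (i + 1)
        · simp at hn ⊢; omega
        · rw [pvBump_length]; exact hs
        · split
          · rw [List.length_set]; exact he
          · exact he
        · intro t h1 h2
          rw [pvBump_getD _ ((min ((i : Int) + k) (n : Int) - i).toNat) i _ rfl (by omega) servers hstop t]
          have hbase := hinv t (by omega) h2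
          rw [pvS_bot expire i (t + 1) (by omega)] at hbase
          by_cases hin : (i : Int) + k < (n : Int)
          · rw [if_pos hin]
            have hu : ((i : Int) + k).toNat < expire.length := by rw [he]; omega
            rw [pvS_set expire _ _ hu]
            split_ifs <;> omega
          · rw [if_neg hin]
            split_ifs <;> omega
      · rw [if_neg hk]
        rw [PySem.List.pyRange_one_eq_nil (by omega : min ((i : Int) + k) (n : Int) ≤ (i : Int))]
        simp only [List.foldl_nil]
        rw [hcast]
        apply ih (i + 1)
        · simp at hn ⊢; omega
        · exact hs
        · exact he
        · intro t h1 h2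
          have hbase := hinv t (by omega) h2
          rw [pvS_bot expire i (t + 1) (by omega)] at hbase
          omega
    · rw [if_neg hadd, if_neg hadd]
      rw [hcast]
      apply ih (i + 1)
      · simp at hn ⊢; omega
      · exact hs
      · exact he
      · intro t h1 h2
        have hbase := hinv t (by omega) h2
        rw [pvS_bot expire i (t + 1) (by omega)] at hbase
        omega

theorem pv_servers0 (n : Nat) :
    (PySem.List.pyRange 0 (n : Int) 1).map (fun _ => (0 : Int)) = List.replicate n 0 := by
  rw [List.eq_replicate_iff]
  constructor
  · simp
  · intro b hb
    simp at hb
    exact hb.2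

theorem pv_getD_replicate (n t : Nat) : (List.replicate n (0 : Int)).getD t 0 = 0 := by
  simp [List.getD, List.getElem?_replicate]
  split <;> rfl

-- ===== VERDICT (by name: the statement is the Claim_ definition above) =====
theorem solution_spec : Claim_equal_solution := by
  intro players m k _ _
  unfold Spec_solution solution solution_alt
  simp only []
  rw [pv_servers0 players.length]
  exact pv_loop_eq m k players.length players 0 0 0 _ _ (by simp) (by simp) (by simp)
    (by intro t _ _
        rw [pv_getD_replicate]
        unfold pvS
        have : ∀ j ∈ Finset.Ico 0 (t+1), (List.replicate players.length (0:Int)).getD j 0 = 0 := by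
          intro j _; exact pv_getD_replicate _ _
        rw [Finset.sum_congr rfl this]
        simp)
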